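-- pv_equiv track=rewrite | github.com/turksabsw/Frappe-V15 | frappe-bench/apps/frappe_pim/frappe_pim/pim/utils/scoring.py | evaluate_content_quality
-- ===== SOURCE A (Python) =====
-- def evaluate_content_quality(field, value):
--     """Evaluate quality of a content field value.
--
--     Quality is based on:
--     - Length (not too short, not excessively long)
--     - Presence of meaningful content (not just placeholders)
--     - Proper formatting
--
--     Args:
--         field: Field name
--         value: Field value
--
--     Returns:
--         int: Quality points (0-100)
--     """
--     if not value:
--         return 0
--
--     value = str(value).strip()
--     points = 0
--
--     # Check for placeholder text
--     placeholders = ["lorem ipsum", "test", "placeholder", "tbd", "n/a", "xxx"]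
--     lower_value = value.lower()
--     for placeholder in placeholders:
--         if placeholder in lower_value:
--             return 20  # Low quality for placeholder text
--
--     # Length-based scoring
--     length = len(value)
--
--     if field == "product_name":
--         if 5 <= length <= 100:
--             points = 100
--         elif 3 <= length < 5:
--             points = 60
--         elif length > 100:
--             points = 80
--         else:
--             points = 40
--
--     elif field == "short_description":
--         if 50 <= length <= 300:
--             points = 100
--         elif 20 <= length < 50:
--             points = 70
--         elif length > 300:
--             points = 80
--         else:
--             points = 40
--
--     elif field == "long_description":
--         if length >= 200:
--             points = 100
--         elif 100 <= length < 200: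
--             points = 80
--         elif 50 <= length < 100:
--             points = 60
--         else:
--             points = 40
--
--     else:
--         # Generic quality scoring for other fields
--         if length >= 50:
--             points = 100
--         elif length >= 20:
--             points = 70
--         else:
--             points = 50
--
--     return points
-- ===== SOURCE B (Python) =====
-- _PLACEHOLDERS = ("lorem ipsum", "test", "placeholder", "tbd", "n/a", "xxx")
--
-- # field -> (base points, list of (threshold, delta)): score = base + sum of
-- # deltas whose threshold the stripped length reaches (over-length bands are
-- # negative deltas), an additive formulation of the scoring curve.
-- _STEPS = {
--     "product_name": (40, [(3, 20), (5, 40), (101, -20)]),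
--     "short_description": (40, [(20, 30), (50, 30), (301, -20)]),
--     "long_description": (40, [(50, 20), (100, 20), (200, 20)]),
-- }
-- _GENERIC = (50, [(20, 20), (50, 30)])
--
--
-- def evaluate_content_quality(field, value):
--     if not value:
--         return 0
--     v = str(value).strip()
--     low = v.lower()
--     if any(p in low for p in _PLACEHOLDERS):
--         return 20
--     n = len(v)
--     base, steps = _STEPS.get(field, _GENERIC)
--     return base + sum(d for t, d in steps if n >= t)
-- ===== Notes on version B (the rewrite author's own statement) =====
-- stated objective: alternative
-- what changed: Replaced A's per-field first-match if/elif range cascades with an additive formulation: each field maps to a base score plus (threshold, delta) steps, and the score is the base plus the sum of deltas whose threshold the length reaches (over-length bands as negative deltas).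
import Mathlib
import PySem

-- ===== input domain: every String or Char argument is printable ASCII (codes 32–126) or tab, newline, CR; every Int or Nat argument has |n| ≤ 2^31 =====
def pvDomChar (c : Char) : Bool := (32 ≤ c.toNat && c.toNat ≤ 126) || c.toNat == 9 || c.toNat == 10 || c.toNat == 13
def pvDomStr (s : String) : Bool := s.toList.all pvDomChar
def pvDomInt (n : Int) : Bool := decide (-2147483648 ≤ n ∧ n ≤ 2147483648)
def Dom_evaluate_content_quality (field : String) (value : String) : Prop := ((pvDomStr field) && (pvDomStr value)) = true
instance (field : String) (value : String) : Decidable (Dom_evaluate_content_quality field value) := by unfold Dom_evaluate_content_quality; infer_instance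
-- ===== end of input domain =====

-- B computes the score additively (base + sum of threshold deltas the length reaches)
-- instead of A's first-match if/elif range cascades (objective: alternative).

-- ===== PORT A =====
-- A's `for placeholder in placeholders: if placeholder in lower_value: return 20`
def pvPlacehoLoop : List String → String → Bool
  | [], _ => false
  | p :: rest, s => if PySem.Str.isIn p s then true else pvPlacehoLoop rest s

def evaluate_content_quality (field : String) (value : String) : Int :=
  if value = "" then 0
  else
    let v := PySem.Str.strip value
    let lower_value := PySem.Str.lower v
    if pvPlacehoLoop ["lorem ipsum", "test", "placeholder", "tbd", "n/a", "xxx"] lower_value then 20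
    else
      let length : Int := PySem.Str.len v
      if field = "product_name" then
        if 5 ≤ length ∧ length ≤ 100 then 100
        else if 3 ≤ length ∧ length < 5 then 60
        else if length > 100 then 80
        else 40
      else if field = "short_description" then
        if 50 ≤ length ∧ length ≤ 300 then 100
        else if 20 ≤ length ∧ length < 50 then 70
        else if length > 300 then 80
        else 40
      else if field = "long_description" then
        if length ≥ 200 then 100
        else if 100 ≤ length ∧ length < 200 then 80
        else if 50 ≤ length ∧ length < 100 then 60
        else 40
      else
        if length ≥ 50 then 100
        else if length ≥ 20 then 70
        else 50

-- ===== PORT B =====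
-- field -> (base, (threshold, delta) steps); score = base + Σ deltas with threshold ≤ length
def pvStepsTable : PySem.Dict String (Int × List (Int × Int)) :=
  PySem.Dict.ofList
    [ ("product_name", (40, [(3, 20), (5, 40), (101, -20)]))
    , ("short_description", (40, [(20, 30), (50, 30), (301, -20)]))
    , ("long_description", (40, [(50, 20), (100, 20), (200, 20)])) ]

-- `sum(d for t, d in steps if n >= t)`
def pvSumSteps (n : Int) : List (Int × Int) → Int
  | [] => 0
  | (t, d) :: rest => (if t ≤ n then d else 0) + pvSumSteps n rest

def evaluate_content_quality_alt (field : String) (value : String) : Int :=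
  if value = "" then 0
  else
    let v := PySem.Str.strip value
    let low := PySem.Str.lower v
    if (["lorem ipsum", "test", "placeholder", "tbd", "n/a", "xxx"].any
          (fun p => PySem.Str.isIn p low)) then 20
    else
      let bs := pvStepsTable.getD field (50, [(20, 20), (50, 30)])
      bs.1 + pvSumSteps (PySem.Str.len v) bs.2

-- ===== PRECONDITION & SPEC =====
def Spec_evaluate_content_quality (field : String) (value : String) (out : Int) : Prop := out = evaluate_content_quality_alt field value
instance (field : String) (value : String) (out : Int) : Decidable (Spec_evaluate_content_quality field value out) := by unfold Spec_evaluate_content_quality; infer_instance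

-- ===== CLAIM =====
def Claim_equal_evaluate_content_quality : Prop := ∀ (field : String) (value : String), Dom_evaluate_content_quality field value → Spec_evaluate_content_quality field value (evaluate_content_quality field value)

-- ===== LEMMAS AND PROOFS =====
theorem pvPlaceho_eq_any (s : String) (l : List String) :
    pvPlacehoLoop l s = l.any (fun p => PySem.Str.isIn p s) := by
  induction l with
  | nil => rfl
  | cons p rest ih => simp [pvPlacehoLoop, List.any, ih]

theorem pvSteps_getD_other (field : String)
    (h1 : ¬ field = "product_name") (h2 : ¬ field = "short_description")
    (h3 : ¬ field = "long_description")
    (g : Int × List (Int × Int)) :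
    pvStepsTable.getD field g = g := by
  refine PySem.Dict.getD_of_not_contains _ _ ?_
  rw [show pvStepsTable = PySem.Dict.mk
      [ ("product_name", (40, [(3, 20), (5, 40), (101, -20)]))
      , ("short_description", (40, [(20, 30), (50, 30), (301, -20)]))
      , ("long_description", (40, [(50, 20), (100, 20), (200, 20)])) ] from rfl]
  simp [PySem.Dict.contains_mk]
  exact ⟨Ne.symm h1, Ne.symm h2, Ne.symm h3⟩

-- ===== VERDICT =====
theorem evaluate_content_quality_spec : Claim_equal_evaluate_content_quality := by
  intro field value _
  unfold Spec_evaluate_content_quality evaluate_content_quality evaluate_content_quality_alt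
  by_cases hv : value = ""
  · simp [hv]
  · simp only [hv, pvPlaceho_eq_any, reduceIte]
    split
    · rfl
    · by_cases h1 : field = "product_name"
      · subst h1
        rw [show pvStepsTable.getD "product_name" (50, [(20, 20), (50, 30)])
              = (40, [(3, 20), (5, 40), (101, -20)]) from rfl]
        simp [pvSumSteps]
        split_ifs <;> simp_all <;> omega
      · by_cases h2 : field = "short_description"
        · subst h2
          rw [show pvStepsTable.getD "short_description" (50, [(20, 20), (50, 30)])
                = (40, [(20, 30), (50, 30), (301, -20)]) from rfl]
          simp [h1, pvSumSteps]
          split_ifs <;> simp_all <;> omega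
        · by_cases h3 : field = "long_description"
          · subst h3
            rw [show pvStepsTable.getD "long_description" (50, [(20, 20), (50, 30)])
                  = (40, [(50, 20), (100, 20), (200, 20)]) from rfl]
            simp [h1, h2, pvSumSteps]
            split_ifs <;> simp_all <;> omega
          · rw [pvSteps_getD_other field h1 h2 h3]
            simp [h1, h2, h3, pvSumSteps]
            split_ifs <;> simp_all <;> omega
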